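-- pv_equiv track=rewrite | github.com/fleetster22/mod1_python_practice | practice.py | who_finished_project_and_passed_assessment
-- ===== SOURCE A (Python) =====
-- def who_finished_project_and_passed_assessment(projects, assessments):
--     cache = {}
--     passed_both = []
--     for project in projects:
--         cache[project] = True
--     for assessment in assessments:
--         cache[assessment] = False
--     for student in cache:
--         if cache.get(student):
--             passed_both.append(student)
--     return passed_both
-- ===== SOURCE B (Python) =====
-- def who_finished_project_and_passed_assessment(projects, assessments):
--     failed = set(assessments)
--     emitted = set()
--     result = []
--     for p in projects:
--         if p not in failed and p not in emitted:
--             emitted.add(p)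
--             result.append(p)
--     return result
-- ===== Notes on version B (the rewrite author's own statement) =====
-- stated objective: simpler
-- what changed: Replaces A's three-pass dict strategy (mark projects True, overwrite assessments False, sweep the dict) with a single filtering pass over projects using a precomputed assessments set and an 'emitted' set for dedup.
import Mathlib
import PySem

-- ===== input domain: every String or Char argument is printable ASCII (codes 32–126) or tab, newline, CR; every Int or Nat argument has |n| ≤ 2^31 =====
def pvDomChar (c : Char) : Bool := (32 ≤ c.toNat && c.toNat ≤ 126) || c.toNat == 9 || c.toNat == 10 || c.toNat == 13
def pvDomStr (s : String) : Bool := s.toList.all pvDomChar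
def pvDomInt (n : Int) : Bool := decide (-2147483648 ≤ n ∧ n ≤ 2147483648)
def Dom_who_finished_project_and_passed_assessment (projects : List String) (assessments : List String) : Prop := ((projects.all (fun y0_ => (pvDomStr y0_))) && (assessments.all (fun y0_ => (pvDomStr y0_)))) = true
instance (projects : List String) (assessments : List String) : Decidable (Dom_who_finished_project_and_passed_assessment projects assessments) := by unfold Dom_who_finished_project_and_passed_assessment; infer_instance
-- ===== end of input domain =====

-- B replaces A's three-pass dict strategy (mark projects True, overwrite assessments False, sweep the
-- dict) with one filtering pass over projects using an assessments set and an 'emitted' set: simpler.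

-- ===== PORT A =====
def who_finished_project_and_passed_assessment (projects : List String) (assessments : List String) : List String :=
  let cache : PySem.Dict String Bool := PySem.Dict.empty
  let cache := projects.foldl (fun d project => d.insert project true) cache
  let cache := assessments.foldl (fun d assessment => d.insert assessment false) cache
  -- 'cache.get(student)' is truthy exactly when the stored value is True; every iterated
  -- student is a key of cache, so the total 'getD … false' is exact here
  cache.keys.foldl
    (fun passed_both student =>
      if cache.getD student false then passed_both ++ [student] else passed_both) []

-- ===== PORT B =====
def pvAltLoop (failed : PySem.Set String) (ps : List String) (emitted : PySem.Set String)
    (result : List String) : List String :=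
  match ps with
  | [] => result
  | p :: rest =>
    if !(PySem.Set.contains failed p) && !(PySem.Set.contains emitted p) then
      pvAltLoop failed rest (PySem.Set.add emitted p) (result ++ [p])
    else
      pvAltLoop failed rest emitted result

def who_finished_project_and_passed_assessment_alt (projects : List String) (assessments : List String) : List String :=
  pvAltLoop (PySem.Set.ofList assessments) projects PySem.Set.empty []

-- ===== PRECONDITION & SPEC =====
def Spec_who_finished_project_and_passed_assessment (projects : List String) (assessments : List String) (out : List String) : Prop := out = who_finished_project_and_passed_assessment_alt projects assessments
instance (projects : List String) (assessments : List String) (out : List String) : Decidable (Spec_who_finished_project_and_passed_assessment projects assessments out) := by unfold Spec_who_finished_project_and_passed_assessment; infer_instance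

-- ===== CLAIM (what is proved, stated in full; the proofs are below) =====
def Claim_equal_who_finished_project_and_passed_assessment : Prop := ∀ (projects : List String) (assessments : List String), Dom_who_finished_project_and_passed_assessment projects assessments → Spec_who_finished_project_and_passed_assessment projects assessments (who_finished_project_and_passed_assessment projects assessments)

-- ===== LEMMAS AND PROOFS =====

-- value stored after a loop of constant-value inserts
theorem pv_getD_foldl_insert_const (l : List String) (v : Bool) (d : PySem.Dict String Bool) (k : String) :
    (l.foldl (fun d x => d.insert x v) d).getD k false = if k ∈ l then v else d.getD k false := by
  induction l generalizing d with
  | nil => simp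
  | cons x l ih =>
    simp only [List.foldl_cons, ih, PySem.Dict.getD_insert, List.mem_cons]
    by_cases hkx : k = x <;> by_cases hkl : k ∈ l <;> simp [hkx, hkl]

-- the first-occurrence elements of ps not already in e (proof helper naming B's dedup order)
def pvDedupFrom : List String → List String → List String
  | [], _ => []
  | p :: rest, e => if e.contains p then pvDedupFrom rest e else p :: pvDedupFrom rest (e ++ [p])

theorem pv_dedupFrom_append (ps : List String) : ∀ e : List String,
    e ++ pvDedupFrom ps e = PySem.Set.update e ps := by
  induction ps with
  | nil => intro e; simp [pvDedupFrom, PySem.Set.update_nil]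
  | cons p rest ih =>
    intro e
    rw [PySem.Set.update_cons]
    by_cases hp : p ∈ e
    · simp [pvDedupFrom, hp, ih]
    · have : e ++ pvDedupFrom (p :: rest) e = (e ++ [p]) ++ pvDedupFrom rest (e ++ [p]) := by
        simp [pvDedupFrom, hp]
      rw [this, ih, PySem.Set.add_of_not_mem hp]

theorem pv_altLoop_spec (failed : PySem.Set String) (ps : List String) :
    ∀ (e e' res : List String), (∀ x, x ∉ (failed : List String) → (x ∈ e ↔ x ∈ e')) →
    pvAltLoop failed ps e res
      = res ++ (pvDedupFrom ps e').filter (fun p => !(PySem.Set.contains failed p)) := by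
  induction ps with
  | nil => intro e e' res _; simp [pvAltLoop, pvDedupFrom]
  | cons p rest ih =>
    intro e e' res hee'
    by_cases hf : p ∈ (failed : List String)
    · by_cases hpe' : p ∈ e'
      · simp [pvAltLoop, pvDedupFrom, hf, hpe', ih e e' res hee']
      · have hstep : ∀ x, x ∉ (failed : List String) → (x ∈ e ↔ x ∈ e' ++ [p]) := by
          intro x hx
          have hxp : x ≠ p := fun h => hx (h ▸ hf)
          simp [hxp, hee' x hx]
        simp [pvAltLoop, pvDedupFrom, hf, hpe', ih e (e' ++ [p]) res hstep]
    · have hmem := hee' p hf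
      by_cases hpe : p ∈ e
      · have hpe' : p ∈ e' := hmem.mp hpe
        simp [pvAltLoop, pvDedupFrom, hf, hpe, hpe', ih e e' res hee']
      · have hpe' : p ∉ e' := fun h => hpe (hmem.mpr h)
        have hstep : ∀ x, x ∉ (failed : List String) → (x ∈ e ++ [p] ↔ x ∈ e' ++ [p]) := by
          intro x hx; simp [hee' x hx]
        simp [pvAltLoop, pvDedupFrom, hf, hpe, hpe',
          ih (e ++ [p]) (e' ++ [p]) (res ++ [p]) hstep]

-- B computes: first occurrences of projects, keeping those not in assessments
theorem pv_alt_closed (projects assessments : List String) :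
    who_finished_project_and_passed_assessment_alt projects assessments
      = (PySem.Set.ofList projects).filter
          (fun p => !(PySem.Set.contains (PySem.Set.ofList assessments) p)) := by
  unfold who_finished_project_and_passed_assessment_alt
  rw [pv_altLoop_spec (PySem.Set.ofList assessments) projects PySem.Set.empty [] [] (fun _ _ => Iff.rfl)]
  have h0 : pvDedupFrom projects [] = PySem.Set.ofList projects := by
    have := pv_dedupFrom_append projects []
    simpa [PySem.Set.update_nil_left] using this
  simp [h0]

-- ===== VERDICT (by name: the statement is the Claim_ definition above) =====
theorem who_finished_project_and_passed_assessment_spec : Claim_equal_who_finished_project_and_passed_assessment := by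
  intro projects assessments _
  unfold Spec_who_finished_project_and_passed_assessment
  rw [pv_alt_closed]
  unfold who_finished_project_and_passed_assessment
  rw [PySem.List.foldl_append_if_eq_filter]
  rw [PySem.Dict.keys_foldl_insert, PySem.Dict.keys_foldl_insert, PySem.Dict.keys_empty,
    PySem.Set.update_nil_left, PySem.Set.update_eq_append_filter, List.filter_append]
  have hgetD : ∀ k : String,
      ((assessments.foldl (fun d a => d.insert a false)
          (projects.foldl (fun d p => d.insert p true) PySem.Dict.empty)).getD k false)
        = if k ∈ assessments then false else if k ∈ projects then true else false := by
    intro k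
    rw [pv_getD_foldl_insert_const, pv_getD_foldl_insert_const]
    simp [PySem.Dict.getD_empty]
  have hright : ((PySem.Set.ofList assessments).filter
        (fun y => !(PySem.Set.contains (PySem.Set.ofList projects) y))).filter
        (fun s => (assessments.foldl (fun d a => d.insert a false)
          (projects.foldl (fun d p => d.insert p true) PySem.Dict.empty)).getD s false) = [] := by
    rw [List.filter_eq_nil_iff]
    intro a ha
    have hamem : a ∈ assessments :=
      (PySem.Set.mem_ofList assessments a).mp (List.mem_of_mem_filter ha)
    simp [hgetD, hamem]
  rw [hright, List.append_nil]
  apply List.filter_congr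
  intro x hx
  have hxp : x ∈ projects := (PySem.Set.mem_ofList projects x).mp hx
  rw [hgetD]
  by_cases hxa : x ∈ assessments
  · simp [hxa, (PySem.Set.mem_ofList assessments x).mpr hxa]
  · simp [hxp, hxa]
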